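-- pv_equiv track=rewrite | github.com/Shivam-baghel/Python_Scaler | 2. Data Structures and Algorithm/2. Advance/20. Hashing-2/Assignments/Q1 Permutations of A in B.py | permutationsOfAInB
-- ===== SOURCE A (Python) =====
-- def hashmap(X): # function for making a hashmap or dictionary
--     dictX={}
--     for i in X:
--         if i not in dictX:
--             dictX[i]=0
--         dictX[i]+=1
--     return dictX
--
-- def permutationsOfAInB( A, B):
--     N=len(A)
--     M=len(B)
--     ans=0
--     dictA=hashmap(A)  # create a hashmap of A
--     X=""
--     for i in range(0,N):
--         X+=B[i]
--     dictX=hashmap(X) # create a hashmap of moving window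
--
--     i=0 # window index
--     j=N-1
--
--     while j<M:
--         if dictX==dictA: # if hashmap of both matches
--             ans+=1         # that means that window is permutation of A
--
--         dictX[B[i]]-=1 # remove starting index in window hashmap
--         if dictX[B[i]]==0:
--             del dictX[B[i]]
--         i+=1
--
--         j+=1   # add upcoming index in window hashmap
--         if j==M:
--             break
--         if B[j] in dictX:
--             dictX[B[j]]+=1
--         else:
--             dictX[B[j]]=1
--
--     return ans
-- ===== SOURCE B (Python) =====
-- def permutationsOfAInB(A, B):
--     n = len(A)
--     sig = sorted(A)
--     ans = 0
--     for k in range(len(B) - n + 1):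
--         if sorted(B[k:k+n]) == sig:
--             ans += 1
--     return ans
-- ===== Notes on version B (the rewrite author's own statement) =====
-- stated objective: alternative
-- what changed: Replaces A's sliding hash-map window with per-step full dict-equality tests by a stateless brute-force scan that compares the sorted character signature sorted(B[k:k+n]) of each window against the precomputed sorted(A) - sorting instead of frequency hashing, no incremental window state.
-- crash fix: A raises on every input with len(A)==0 (KeyError from the empty-window bookkeeping) or len(A)>len(B) (IndexError while building the first window); B returns the natural window count there (len(B)+1 when A is empty, 0 when A is longer than B). — e.g. on permutationsOfAInB("", "ab"): A raises KeyError, B returns 3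
import Mathlib
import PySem

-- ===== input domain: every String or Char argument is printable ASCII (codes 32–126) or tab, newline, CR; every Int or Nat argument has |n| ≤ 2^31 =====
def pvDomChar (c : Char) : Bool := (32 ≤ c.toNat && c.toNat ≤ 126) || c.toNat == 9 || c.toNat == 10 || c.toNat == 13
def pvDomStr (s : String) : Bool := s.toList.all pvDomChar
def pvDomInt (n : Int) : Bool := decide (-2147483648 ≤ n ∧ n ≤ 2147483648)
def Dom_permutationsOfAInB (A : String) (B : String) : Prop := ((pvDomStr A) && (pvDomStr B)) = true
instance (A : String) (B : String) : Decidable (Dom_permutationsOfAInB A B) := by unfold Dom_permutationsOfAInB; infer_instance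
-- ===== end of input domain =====

-- B replaces A's sliding hash-map window (full dict-equality test per step) by a stateless
-- brute-force scan comparing each window's sorted character signature against sorted(A):
-- objective 'alternative' (sorting instead of frequency hashing; not faster).

-- ===== PORT A =====

-- Python 'hashmap(X)': if i not in dictX: dictX[i]=0; dictX[i]+=1
def pvHashmap (X : List Char) : PySem.Dict Char Int :=
  X.foldl (fun d i =>
    let d' := if d.contains i then d else d.insert i 0
    d'.insert i (d'.getD i 0 + 1)) PySem.Dict.empty

-- Python's '==' on dicts ignores insertion order: equal sizes and every item of the
-- left dict found with the same value in the right dict.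
def pvPyDictEq (d e : PySem.Dict Char Int) : Bool :=
  d.size == e.size && d.items.all (fun p => e.get? p.1 == some p.2)

-- the 'while j < M' loop of A, step for step (B[i] / B[j] via pyGetD; in range under Pre_)
def pvLoopA (b : List Char) (M : Int) (dictA : PySem.Dict Char Int)
    (ans : Int) (dictX : PySem.Dict Char Int) (i j : Int) : Int :=
  if h : j < M then
    let ans1 := if pvPyDictEq dictX dictA then ans + 1 else ans
    let c := PySem.List.pyGetD b i ' '
    let d1 := dictX.insert c (dictX.getD c 0 - 1)
    let d2 := if d1.getD c 0 == 0 then d1.erase c else d1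
    let i1 := i + 1
    let j1 := j + 1
    if j1 == M then ans1
    else
      let c2 := PySem.List.pyGetD b j1 ' '
      let d3 := if d2.contains c2 then d2.insert c2 (d2.getD c2 0 + 1) else d2.insert c2 1
      pvLoopA b M dictA ans1 d3 i1 j1
  else ans
termination_by (M - j).toNat
decreasing_by omega

def permutationsOfAInB (A : String) (B : String) : Int :=
  let b := B.toList
  let N : Int := PySem.Str.len A
  let M : Int := PySem.Str.len B
  let dictA := pvHashmap A.toList
  let X : List Char := (PySem.List.pyRange 0 N).foldl (fun X i => X ++ [PySem.List.pyGetD b i ' ']) []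
  let dictX := pvHashmap X
  pvLoopA b M dictA 0 dictX 0 (N - 1)

-- ===== PORT B =====

def permutationsOfAInB_alt (A : String) (B : String) : Int :=
  let b := B.toList
  let n : Int := PySem.Str.len A
  let sig := PySem.List.sorted A.toList (fun x => x) false
  (PySem.List.pyRange 0 (PySem.Str.len B - n + 1)).foldl
    (fun ans k =>
      if PySem.List.sorted (PySem.List.slice b (some k) (some (k + n))) (fun x => x) false == sig
      then ans + 1 else ans) 0

-- ===== PRECONDITION & SPEC =====
-- A raises (IndexError/KeyError) whenever len(A) = 0 or len(A) > len(B); Pre_ is exactly the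
-- complement: every input on which the Python A returns normally.
def Pre_permutationsOfAInB (A : String) (B : String) : Prop :=
  1 ≤ A.toList.length ∧ A.toList.length ≤ B.toList.length
instance (A : String) (B : String) : Decidable (Pre_permutationsOfAInB A B) := by
  unfold Pre_permutationsOfAInB; infer_instance

def pvWitness_permutationsOfAInB : String × String := ("ab", "bab")

-- A raises on every input with len(A)=0 (KeyError in the first window step) or
-- len(A)>len(B) (IndexError building the first window); B returns the natural window count
-- there (len(B)+1 for empty A, 0 when A is longer than B).
def Raises_permutationsOfAInB (A : String) (B : String) : Prop :=
  A.toList.length = 0 ∨ B.toList.length < A.toList.length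
instance (A : String) (B : String) : Decidable (Raises_permutationsOfAInB A B) := by
  unfold Raises_permutationsOfAInB; infer_instance
def pvRaiseWitness_permutationsOfAInB : String × String := ("", "ab")
def pvRaiseWitnessOut_permutationsOfAInB : Int := 3

def Spec_permutationsOfAInB (A : String) (B : String) (out : Int) : Prop := out = permutationsOfAInB_alt A B
instance (A : String) (B : String) (out : Int) : Decidable (Spec_permutationsOfAInB A B out) := by unfold Spec_permutationsOfAInB; infer_instance

-- ===== CLAIM (what is proved, stated in full; the proofs are below) =====
def Claim_equal_permutationsOfAInB : Prop := ∀ (A : String) (B : String), Dom_permutationsOfAInB A B → Pre_permutationsOfAInB A B → Spec_permutationsOfAInB A B (permutationsOfAInB A B)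
def Claim_raises_permutationsOfAInB : Prop := (∀ (A : String) (B : String), Dom_permutationsOfAInB A B → Raises_permutationsOfAInB A B → ¬ Pre_permutationsOfAInB A B) ∧ (Dom_permutationsOfAInB (pvRaiseWitness_permutationsOfAInB.1) (pvRaiseWitness_permutationsOfAInB.2) ∧ Raises_permutationsOfAInB (pvRaiseWitness_permutationsOfAInB.1) (pvRaiseWitness_permutationsOfAInB.2) ∧ permutationsOfAInB_alt (pvRaiseWitness_permutationsOfAInB.1) (pvRaiseWitness_permutationsOfAInB.2) = pvRaiseWitnessOut_permutationsOfAInB)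

-- ===== LEMMAS AND PROOFS =====

-- d holds exactly the nonzero values of the multiplicity function f (keys unique)
def pvDRep (d : PySem.Dict Char Int) (f : Char → Int) : Prop :=
  d.keys.Nodup ∧ ∀ c, d.get? c = if f c = 0 then none else some (f c)

-- window of length n starting at k
def pvW (b : List Char) (n k : Nat) : List Char := (b.drop k).take n

-- the per-window predicate both programs count
def pvGood (a b : List Char) (k : Nat) : Bool := (pvW b a.length k).isPerm a

theorem pvget?_erase (d : PySem.Dict Char Int) (k k' : Char) :
    (d.erase k).get? k' = if k' = k then none else d.get? k' := by
  simp only [PySem.Dict.erase, PySem.Dict.get?, List.find?_filter]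
  by_cases hk : k' = k
  · subst hk
    rw [List.find?_eq_none.2 (by intro a _; by_cases h : a.1 = k' <;> simp [h]), if_pos rfl]
    rfl
  · rw [if_neg hk]
    congr 2
    funext a
    by_cases h : a.1 = k' <;> simp_all

theorem pvnodup_keys_erase (d : PySem.Dict Char Int) (k : Char) (h : d.keys.Nodup) :
    (d.erase k).keys.Nodup := by
  have hsub : ((d.erase k).items.map Prod.fst).Sublist (d.items.map Prod.fst) :=
    List.Sublist.map _ List.filter_sublist
  exact hsub.nodup h

theorem pvDRep_congr {d : PySem.Dict Char Int} {f g : Char → Int}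
    (h : pvDRep d f) (hfg : ∀ c, f c = g c) : pvDRep d g := by
  have : f = g := funext hfg
  rwa [this] at h

theorem pvDRep_empty : pvDRep PySem.Dict.empty (fun _ => 0) := by
  constructor
  · simp [PySem.Dict.keys, PySem.Dict.empty]
  · intro c; simp [PySem.Dict.get?, PySem.Dict.empty]

theorem pvDRep_getD {d : PySem.Dict Char Int} {f : Char → Int} (h : pvDRep d f) (c : Char) :
    d.getD c 0 = f c := by
  rw [PySem.Dict.getD_eq_get?_getD, h.2 c]
  by_cases hc : f c = 0 <;> simp [hc]

theorem pvkeys_len_eq_size (d : PySem.Dict Char Int) : d.keys.length = d.size := by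
  simp [PySem.Dict.keys, PySem.Dict.size]

theorem pvPyDictEq_iff {d e : PySem.Dict Char Int} {f g : Char → Int}
    (hd : pvDRep d f) (he : pvDRep e g) : pvPyDictEq d e = true ↔ ∀ c, f c = g c := by
  unfold pvPyDictEq
  rw [Bool.and_eq_true, beq_iff_eq, List.all_eq_true]
  constructor
  · rintro ⟨hsize, hall⟩ c
    have hsub : d.keys ⊆ e.keys := by
      intro k hk
      have hne : d.get? k ≠ none := by
        rw [Ne, PySem.Dict.get?_eq_none_iff_not_mem_keys]; simp [hk]
      obtain ⟨v, hv⟩ := Option.ne_none_iff_exists'.1 hne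
      have hitem : (k, v) ∈ d.items := (PySem.Dict.get?_eq_some_iff_mem_items d k v hd.1).1 hv
      have := hall _ hitem
      rw [beq_iff_eq] at this
      by_contra hnot
      have h0 : e.get? k = none := (PySem.Dict.get?_eq_none_iff_not_mem_keys e k).2 hnot
      simp [h0] at this
    have hperm : d.keys.Perm e.keys := by
      apply List.Subperm.perm_of_length_le (hd.1.subperm hsub)
      rw [pvkeys_len_eq_size, pvkeys_len_eq_size, hsize]
    by_cases hfc : f c = 0
    · by_cases hgc : g c = 0
      · rw [hfc, hgc]
      · exfalso
        have hck : c ∈ e.keys := by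
          by_contra hnot
          have h0 := (PySem.Dict.get?_eq_none_iff_not_mem_keys e c).2 hnot
          rw [he.2 c] at h0; simp [hgc] at h0
        have hcd : c ∈ d.keys := hperm.mem_iff.2 hck
        have : d.get? c = none := by rw [hd.2 c]; simp [hfc]
        exact (PySem.Dict.get?_eq_none_iff_not_mem_keys d c).1 this hcd
    · have hv : d.get? c = some (f c) := by rw [hd.2 c]; simp [hfc]
      have hitem : (c, f c) ∈ d.items := (PySem.Dict.get?_eq_some_iff_mem_items d c _ hd.1).1 hv
      have := hall _ hitem
      rw [beq_iff_eq] at this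
      rw [he.2 c] at this
      by_cases hgc : g c = 0
      · simp [hgc] at this
      · simp only [if_neg hgc] at this
        exact (Option.some_inj.1 this).symm
  · intro hfg
    have hget : ∀ c, d.get? c = e.get? c := by
      intro c; rw [hd.2 c, he.2 c, hfg c]
    have hkeys : ∀ k, k ∈ d.keys ↔ k ∈ e.keys := by
      intro k
      rw [← not_iff_not]
      rw [← PySem.Dict.get?_eq_none_iff_not_mem_keys, ← PySem.Dict.get?_eq_none_iff_not_mem_keys, hget k]
    constructor
    · rw [← pvkeys_len_eq_size d, ← pvkeys_len_eq_size e]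
      exact List.Perm.length_eq ((List.perm_ext_iff_of_nodup hd.1 he.1).2 hkeys)
    · intro p hp
      rw [beq_iff_eq, ← hget p.1]
      exact PySem.Dict.get?_of_mem_items d hp hd.1

theorem pvDRep_hashStep {d : PySem.Dict Char Int} {f : Char → Int} (h : pvDRep d f)
    (c : Char) (hnn : 0 ≤ f c) :
    pvDRep ((if d.contains c then d else d.insert c 0).insert c
        ((if d.contains c then d else d.insert c 0).getD c 0 + 1))
      (fun c' => if c' = c then f c' + 1 else f c') := by
  by_cases hc : d.contains c = true
  · rw [if_pos hc]
    refine ⟨PySem.Dict.nodup_keys_insert d c _ h.1, ?_⟩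
    intro c'
    rw [PySem.Dict.get?_insert, pvDRep_getD h c]
    by_cases hcc : c' = c <;> simp [hcc, h.2 c']
    omega
  · rw [if_neg hc]
    have hf0 : f c = 0 := by
      have : d.get? c = none := by
        rw [PySem.Dict.contains_eq_isSome_get?] at hc
        cases hg : d.get? c
        · rfl
        · rw [hg] at hc; simp at hc
      rw [h.2 c] at this
      by_cases hfc : f c = 0
      · exact hfc
      · simp [hfc] at this
    rw [PySem.Dict.getD_insert_self, PySem.Dict.insert_insert_self]
    refine ⟨PySem.Dict.nodup_keys_insert d c _ h.1, ?_⟩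
    intro c'
    rw [PySem.Dict.get?_insert]
    by_cases hcc : c' = c <;> simp [hcc, hf0, h.2 c']

theorem pvDRep_hashmap_fold (l : List Char) :
    ∀ (d : PySem.Dict Char Int) (f : Char → Int), pvDRep d f → (∀ c, 0 ≤ f c) →
    pvDRep (l.foldl (fun d i =>
        let d' := if d.contains i then d else d.insert i 0
        d'.insert i (d'.getD i 0 + 1)) d)
      (fun c => f c + (l.count c : Int)) := by
  induction l with
  | nil => intro d f h _; simpa using h
  | cons x xs ih =>
    intro d f h hnn
    simp only [List.foldl_cons]
    have hstep := pvDRep_hashStep h x (hnn x)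
    have hnn' : ∀ c, 0 ≤ (fun c' => if c' = x then f c' + 1 else f c') c := by
      intro c; by_cases hc : c = x <;> simp only [hc, ite_true, ite_false] <;>
        first | (have := hnn x; omega) | exact hnn c
    have := ih _ _ hstep hnn'
    refine pvDRep_congr this ?_
    intro c
    rw [List.count_cons]
    by_cases hc : c = x
    · simp only [hc, ite_true, beq_self_eq_true]
      push_cast
      ring
    · simp [hc, Ne.symm hc]

theorem pvDRep_hashmap (l : List Char) : pvDRep (pvHashmap l) (fun c => (l.count c : Int)) := by
  have := pvDRep_hashmap_fold l PySem.Dict.empty (fun _ => 0) pvDRep_empty (by intro c; simp)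
  exact pvDRep_congr this (by intro c; simp)

theorem pvDRep_decA {d : PySem.Dict Char Int} {f : Char → Int} (h : pvDRep d f) (c : Char) :
    pvDRep (if (d.insert c (d.getD c 0 - 1)).getD c 0 == 0
            then (d.insert c (d.getD c 0 - 1)).erase c else d.insert c (d.getD c 0 - 1))
      (fun c' => if c' = c then f c' - 1 else f c') := by
  rw [PySem.Dict.getD_insert_self, pvDRep_getD h c]
  by_cases hz : f c - 1 = 0
  · rw [if_pos (by simp [hz])]
    refine ⟨pvnodup_keys_erase _ c (PySem.Dict.nodup_keys_insert d c _ h.1), ?_⟩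
    intro c'
    rw [pvget?_erase, PySem.Dict.get?_insert]
    by_cases hcc : c' = c <;> simp [hcc, hz, h.2 c']
  · rw [if_neg (by simp [hz])]
    refine ⟨PySem.Dict.nodup_keys_insert d c _ h.1, ?_⟩
    intro c'
    rw [PySem.Dict.get?_insert]
    by_cases hcc : c' = c <;> simp [hcc, hz, h.2 c']

theorem pvDRep_incA {d : PySem.Dict Char Int} {f : Char → Int} (h : pvDRep d f)
    (c : Char) (hnn : 0 ≤ f c) :
    pvDRep (if d.contains c then d.insert c (d.getD c 0 + 1) else d.insert c 1)
      (fun c' => if c' = c then f c' + 1 else f c') := by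
  by_cases hc : d.contains c = true
  · rw [if_pos hc, pvDRep_getD h c]
    refine ⟨PySem.Dict.nodup_keys_insert d c _ h.1, ?_⟩
    intro c'
    rw [PySem.Dict.get?_insert]
    by_cases hcc : c' = c <;> simp [hcc, h.2 c']
    omega
  · rw [if_neg hc]
    have hf0 : f c = 0 := by
      have hnone : d.get? c = none := by
        rw [PySem.Dict.contains_eq_isSome_get?] at hc
        cases hg : d.get? c
        · rfl
        · rw [hg] at hc; simp at hc
      rw [h.2 c] at hnone
      by_cases hfc : f c = 0
      · exact hfc
      · simp [hfc] at hnone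
    refine ⟨PySem.Dict.nodup_keys_insert d c _ h.1, ?_⟩
    intro c'
    rw [PySem.Dict.get?_insert]
    by_cases hcc : c' = c <;> simp [hcc, hf0, h.2 c']

theorem pvW_head (b : List Char) (n k : Nat) (hn : 1 ≤ n) (hk : k < b.length) :
    pvW b n k = b[k] :: (b.drop (k + 1)).take (n - 1) := by
  unfold pvW
  cases n with
  | zero => omega
  | succ n' => rw [List.drop_eq_getElem_cons hk, List.take_succ_cons]; norm_num

theorem pvW_snoc (b : List Char) (n k : Nat) (hn : 1 ≤ n) (hkn : k + n < b.length) :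
    pvW b n (k + 1) = (b.drop (k + 1)).take (n - 1) ++ [b[k + n]] := by
  unfold pvW
  obtain ⟨m, rfl⟩ : ∃ m, n = m + 1 := ⟨n - 1, by omega⟩
  rw [List.take_add_one]
  simp only [Nat.add_sub_cancel]
  rw [List.getElem?_drop]
  have h1 : k + 1 + m = k + (m + 1) := by omega
  rw [h1, List.getElem?_eq_getElem hkn]
  rfl

theorem pvGood_iff_counts (a b : List Char) (k : Nat) :
    pvGood a b k = true ↔ ∀ c, ((pvW b a.length k).count c : Int) = (a.count c : Int) := by
  unfold pvGood
  rw [List.isPerm_iff, List.perm_iff_count]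
  constructor <;> intro h c <;> have := h c <;> exact_mod_cast this

theorem pvMapRangeGetD (b : List Char) (n : Nat) (hn : n ≤ b.length) :
    (List.range n).map (fun k => b.getD k ' ') = b.take n := by
  apply List.ext_getElem
  · simp; omega
  · intro i h1 h2
    simp only [List.getElem_map, List.getElem_range, List.getElem_take]
    have hi : i < b.length := by simp at h1; omega
    rw [List.getD_eq_getElem _ _ hi]

theorem pvLoopA_eq (a b : List Char) (dictA : PySem.Dict Char Int)
    (hA : pvDRep dictA (fun c => (a.count c : Int))) (hn : 1 ≤ a.length) :
    ∀ (len k : Nat) (ans : Int) (dictX : PySem.Dict Char Int),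
      pvDRep dictX (fun c => ((pvW b a.length k).count c : Int)) →
      k + a.length ≤ b.length → len = b.length - a.length - k →
      pvLoopA b (b.length : Int) dictA ans dictX (k : Int) ((k : Int) + a.length - 1)
        = ans + ((List.range (len + 1)).countP (fun r => pvGood a b (k + r)) : Int) := by
  intro len
  induction len with
  | zero =>
    intro k ans dictX hX hkm hlen
    rw [pvLoopA, dif_pos (by omega)]
    have hcmp : pvPyDictEq dictX dictA = pvGood a b k := by
      rw [Bool.eq_iff_iff, pvPyDictEq_iff hX hA, pvGood_iff_counts]
    have hend : (((k : Int) + ↑a.length - 1 + 1 == ↑b.length) = true) := by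
      rw [beq_iff_eq]; omega
    simp only [hcmp, hend, if_true]
    rw [List.range_one]
    simp only [List.countP_cons, List.countP_nil, Nat.add_zero]
    by_cases hg : pvGood a b (k + 0) = true
    · rw [if_pos (by simpa using hg), if_pos (by simpa using hg)]; push_cast; ring
    · rw [if_neg (by simpa using hg), if_neg (by simpa using hg)]; push_cast; ring
  | succ t ih =>
    intro k ans dictX hX hkm hlen
    have hknm : k + a.length < b.length := by omega
    have hkb : k < b.length := by omega
    rw [pvLoopA, dif_pos (by omega)]
    have hcmp : pvPyDictEq dictX dictA = pvGood a b k := by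
      rw [Bool.eq_iff_iff, pvPyDictEq_iff hX hA, pvGood_iff_counts]
    have hend : (((k : Int) + ↑a.length - 1 + 1 == ↑b.length) = false) := by
      rw [beq_eq_false_iff_ne]; intro hcon; omega
    simp only [hcmp, hend, if_false, Bool.false_eq_true]
    -- identify the two accessed characters
    have hc1 : PySem.List.pyGetD b (k : Int) ' ' = b[k] :=
      PySem.List.pyGetD_eq_getElem b ' ' (by omega) (by omega)
    have hc2 : PySem.List.pyGetD b ((k : Int) + ↑a.length - 1 + 1) ' ' = b[k + a.length] := by
      have he : (k : Int) + ↑a.length - 1 + 1 = ((k + a.length : Nat) : Int) := by push_cast; ring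
      rw [he]
      exact PySem.List.pyGetD_eq_getElem b ' ' (by omega) (by omega)
    rw [hc1, hc2]
    -- the window state after removing b[k] and adding b[k+n]
    have hdec := pvDRep_decA hX b[k]
    have hmid : pvDRep (if (dictX.insert b[k] (dictX.getD b[k] 0 - 1)).getD b[k] 0 == 0
            then (dictX.insert b[k] (dictX.getD b[k] 0 - 1)).erase b[k]
            else dictX.insert b[k] (dictX.getD b[k] 0 - 1))
        (fun c => (((b.drop (k + 1)).take (a.length - 1)).count c : Int)) := by
      refine pvDRep_congr hdec ?_
      intro c
      rw [pvW_head b a.length k hn hkb, List.count_cons]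
      by_cases hcc : c = b[k]
      · simp [hcc]
      · simp [hcc, Ne.symm hcc]
    have hinc := pvDRep_incA hmid b[k + a.length] (by positivity)
    have hnew := pvDRep_congr hinc (g := fun c => ((pvW b a.length (k + 1)).count c : Int)) (by
      intro c
      rw [pvW_snoc b a.length k hn hknm]
      simp only [List.count_append, List.count_singleton]
      by_cases hcc : c = b[k + a.length]
      · simp [hcc]
      · simp [hcc, Ne.symm hcc])
    have e1 : (k : Int) + 1 = ((k + 1 : Nat) : Int) := by push_cast; ring
    have e2 : (k : Int) + ↑a.length - 1 + 1 = ((k + 1 : Nat) : Int) + ↑a.length - 1 := by push_cast; ring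
    rw [e2] at hc2 ⊢
    rw [e1]
    rw [ih (k + 1) _ _ hnew (by omega) (by omega)]
    -- count algebra on the right-hand side
    have hsplit : (List.range (t + 1 + 1)).countP (fun r => pvGood a b (k + r))
        = (if pvGood a b k then 1 else 0) + (List.range (t + 1)).countP (fun r => pvGood a b (k + 1 + r)) := by
      rw [List.range_succ_eq_map, List.countP_cons, List.countP_map]
      have : ((fun r => pvGood a b (k + r)) ∘ Nat.succ) = (fun r => pvGood a b (k + 1 + r)) := by
        funext r
        simp only [Function.comp_apply]
        congr 1
        omega
      rw [this]
      simp only [Nat.add_zero]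
      by_cases hg : pvGood a b k = true <;> simp [hg] <;> omega
    rw [hsplit]
    by_cases hg : pvGood a b k = true <;> simp [hg] <;> ring

theorem pvA_closed (A B : String) (hpre : Pre_permutationsOfAInB A B) :
    permutationsOfAInB A B
      = ((List.range (B.toList.length - A.toList.length + 1)).countP
          (fun r => pvGood A.toList B.toList r) : Int) := by
  obtain ⟨h1, h2⟩ := hpre
  unfold permutationsOfAInB
  simp only [PySem.Str.len_eq]
  rw [PySem.List.foldl_append_singleton_eq_map, PySem.List.pyRange_zero_natCast, List.map_map]
  have hX : (List.range A.toList.length).map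
      ((fun i => PySem.List.pyGetD B.toList i ' ') ∘ (fun k : Nat => (k : Int)))
      = B.toList.take A.toList.length := by
    rw [← pvMapRangeGetD B.toList A.toList.length h2]
    apply List.map_congr_left
    intro k hk
    simp [Function.comp, PySem.List.pyGetD_natCast]
  rw [List.nil_append, hX]
  have hA := pvDRep_hashmap A.toList
  have hX0 : pvDRep (pvHashmap (B.toList.take A.toList.length))
      (fun c => ((pvW B.toList A.toList.length 0).count c : Int)) := by
    refine pvDRep_congr (pvDRep_hashmap _) ?_
    intro c
    unfold pvW
    rw [List.drop_zero]
  have e0 : (0 : Int) = ((0 : Nat) : Int) := rfl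
  have e1 : (A.toList.length : Int) - 1 = ((0 : Nat) : Int) + (A.toList.length : Int) - 1 := by ring
  rw [e0, e1, pvLoopA_eq A.toList B.toList (pvHashmap A.toList) hA h1
      (B.toList.length - A.toList.length) 0 ((0:Nat):Int) _ hX0 (by omega) (by omega)]
  rw [Nat.cast_zero, zero_add]
  congr 2
  funext r
  rw [Nat.zero_add]

theorem pvB_closed (A B : String) (hpre : Pre_permutationsOfAInB A B) :
    permutationsOfAInB_alt A B
      = ((List.range (B.toList.length - A.toList.length + 1)).countP
          (fun r => pvGood A.toList B.toList r) : Int) := by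
  obtain ⟨h1, h2⟩ := hpre
  unfold permutationsOfAInB_alt
  simp only [PySem.Str.len_eq]
  have hcast : (B.toList.length : Int) - (A.toList.length : Int) + 1
      = ((B.toList.length - A.toList.length + 1 : Nat) : Int) := by push_cast; omega
  rw [hcast, PySem.List.pyRange_zero_natCast, List.foldl_map]
  refine (PySem.List.foldl_if_add_one _ _ _).trans ?_
  rw [zero_add]
  congr 1
  apply List.countP_congr
  intro k _
  rw [Bool.eq_iff_iff, beq_iff_eq, PySem.List.sorted_id_eq_sorted_id_iff_perm,
      PySem.List.slice_natCast_add]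
  unfold pvGood pvW
  rw [List.isPerm_iff]
  simp

-- ===== VERDICT (by name: the statement is the Claim_ definition above) =====
theorem permutationsOfAInB_spec : Claim_equal_permutationsOfAInB := by
  intro A B _hdom hpre
  unfold Spec_permutationsOfAInB
  rw [pvA_closed A B hpre, pvB_closed A B hpre]

theorem permutationsOfAInB_raises : Claim_raises_permutationsOfAInB := by
  unfold Claim_raises_permutationsOfAInB
  exact ⟨by intro A B _ hr hp; rcases hp with ⟨h1, h2⟩; rcases hr with h | h <;> omega, by decide⟩

-- self-check: the crash-fix witness value proved in permutationsOfAInB_raises is B's value there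
theorem pvRaiseWitness_ok :
    permutationsOfAInB_alt (pvRaiseWitness_permutationsOfAInB.1) (pvRaiseWitness_permutationsOfAInB.2)
      = pvRaiseWitnessOut_permutationsOfAInB :=
  permutationsOfAInB_raises.2.2.2
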